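-- pv_equiv track=rewrite | github.com/poly4/fpl-analsyer | fpl-h2h-analyzer/backend/app/services/analytics/historical_patterns.py | _determine_chip_timing_preference
-- ===== SOURCE A (Python) =====
-- from typing import Dict, List, Any, Optional, Tuple
--
-- def _determine_chip_timing_preference(chips: List[Dict[str, Any]]) -> str:
--     """Determine if manager prefers early/mid/late chip usage"""
--     if not chips:
--         return "none_used"
--
--     early = sum(1 for c in chips if c['event'] <= 10)
--     mid = sum(1 for c in chips if 10 < c['event'] <= 28)
--     late = sum(1 for c in chips if c['event'] > 28)
--
--     if early > mid and early > late:
--         return "early_user"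
--     elif late > early and late > mid:
--         return "late_user"
--     else:
--         return "balanced"
-- ===== SOURCE B (Python) =====
-- def _bisect_right(xs, x):
--     """Index of the first element of sorted xs that is > x (= count of elements <= x)."""
--     lo, hi = 0, len(xs)
--     while lo < hi:
--         mid = (lo + hi) // 2
--         if x < xs[mid]:
--             hi = mid
--         else:
--             lo = mid + 1
--     return lo
--
--
-- def _determine_chip_timing_preference(chips):
--     """Determine if manager prefers early/mid/late chip usage (sort + binary search)."""
--     if not chips:
--         return "none_used"
--     events = sorted(c['event'] for c in chips)
--     n = len(events)
--     early = _bisect_right(events, 10)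
--     late = n - _bisect_right(events, 28)
--     mid = n - early - late
--     if early > mid and early > late:
--         return "early_user"
--     if late > early and late > mid:
--         return "late_user"
--     return "balanced"
-- ===== Notes on version B (the rewrite author's own statement) =====
-- stated objective: alternative
-- what changed: Replaces A's three linear comprehension scans with sorting the event list once and locating the <=10 and <=28 boundaries by a hand-written binary search (bisect_right), deriving early/mid/late counts from the two boundary indices.
import Mathlib
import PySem

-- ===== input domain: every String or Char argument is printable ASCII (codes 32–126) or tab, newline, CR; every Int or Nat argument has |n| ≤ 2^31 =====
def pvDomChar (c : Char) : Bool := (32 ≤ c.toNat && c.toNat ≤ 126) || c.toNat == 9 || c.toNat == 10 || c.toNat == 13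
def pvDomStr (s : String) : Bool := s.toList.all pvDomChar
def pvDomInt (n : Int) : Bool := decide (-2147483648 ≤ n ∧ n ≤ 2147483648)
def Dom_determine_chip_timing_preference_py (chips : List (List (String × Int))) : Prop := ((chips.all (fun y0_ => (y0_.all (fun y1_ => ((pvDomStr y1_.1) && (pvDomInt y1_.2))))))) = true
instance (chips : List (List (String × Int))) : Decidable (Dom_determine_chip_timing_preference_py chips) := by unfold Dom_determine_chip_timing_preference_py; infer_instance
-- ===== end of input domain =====

-- B sorts the events once and finds the <=10 / <=28 bucket boundaries by binary search, instead of A's three linear comprehension scans (objective: alternative algorithm).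

-- ===== PORT A =====
-- c['event'] : first-match association-list lookup; the .getD 0 default is never
-- reached inside Pre_ (Python raises KeyError when the key is absent).
def pvEvent (c : List (String × Int)) : Int := (List.lookup "event" c).getD 0

def determine_chip_timing_preference_py (chips : List (List (String × Int))) : String :=
  if chips = [] then "none_used"
  else
    -- early = sum(1 for c in chips if c['event'] <= 10)
    let early : Int := chips.foldl (fun a c => if pvEvent c ≤ 10 then a + 1 else a) 0
    -- mid = sum(1 for c in chips if 10 < c['event'] <= 28)
    let mid : Int := chips.foldl (fun a c => if 10 < pvEvent c ∧ pvEvent c ≤ 28 then a + 1 else a) 0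
    -- late = sum(1 for c in chips if c['event'] > 28)
    let late : Int := chips.foldl (fun a c => if pvEvent c > 28 then a + 1 else a) 0
    if early > mid ∧ early > late then "early_user"
    else if late > early ∧ late > mid then "late_user"
    else "balanced"

-- ===== PORT B =====
-- the while-loop of Source B's _bisect_right; the `none` arm is unreachable because the
-- loop keeps mid < hi ≤ len(xs), so Python's xs[mid] never raises
def pvBisectLoop (xs : List Int) (x : Int) (lo hi : Nat) : Nat :=
  if lo < hi then
    match xs[(lo + hi) / 2]? with
    | some y => if x < y then pvBisectLoop xs x lo ((lo + hi) / 2)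
                else pvBisectLoop xs x ((lo + hi) / 2 + 1) hi
    | none => lo
  else lo
termination_by hi - lo
decreasing_by all_goals omega

-- _bisect_right(xs, x)
def pvBisectRight (xs : List Int) (x : Int) : Nat := pvBisectLoop xs x 0 xs.length

def determine_chip_timing_preference_py_alt (chips : List (List (String × Int))) : String :=
  if chips = [] then "none_used"
  else
    -- events = sorted(c['event'] for c in chips)
    let events := PySem.List.sorted (chips.map pvEvent) (fun e => e) false
    let n : Int := (events.length : Int)
    let early : Int := (pvBisectRight events 10 : Int)
    let late : Int := n - (pvBisectRight events 28 : Int)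
    let mid : Int := n - early - late
    if early > mid ∧ early > late then "early_user"
    else if late > early ∧ late > mid then "late_user"
    else "balanced"

-- ===== PRECONDITION & SPEC =====
-- Pre_ excludes chips lacking an 'event' key: there Python A (and B) raise KeyError.
def Pre_determine_chip_timing_preference_py (chips : List (List (String × Int))) : Prop :=
  (chips.all (fun c => (List.lookup "event" c).isSome)) = true
instance (chips : List (List (String × Int))) : Decidable (Pre_determine_chip_timing_preference_py chips) := by unfold Pre_determine_chip_timing_preference_py; infer_instance
def pvWitness_determine_chip_timing_preference_py : (List (List (String × Int))) := [[("event", 5)], [("event", 30)]]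

def Spec_determine_chip_timing_preference_py (chips : List (List (String × Int))) (out : String) : Prop := out = determine_chip_timing_preference_py_alt chips
instance (chips : List (List (String × Int))) (out : String) : Decidable (Spec_determine_chip_timing_preference_py chips out) := by unfold Spec_determine_chip_timing_preference_py; infer_instance

-- ===== CLAIM (what is proved, stated in full; the proofs are below) =====
def Claim_equal_determine_chip_timing_preference_py : Prop := ∀ (chips : List (List (String × Int))), Dom_determine_chip_timing_preference_py chips → Pre_determine_chip_timing_preference_py chips → Spec_determine_chip_timing_preference_py chips (determine_chip_timing_preference_py chips)

-- ===== LEMMAS AND PROOFS =====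

-- counting a list split at index k: indices < k satisfy p, indices ≥ k do not
theorem countP_eq_of_split (xs : List Int) (p : Int → Bool) (k : Nat) (hk : k ≤ xs.length)
    (hlow : ∀ j : Nat, j < k → (hj : j < xs.length) → p xs[j])
    (hhigh : ∀ j : Nat, k ≤ j → (hj : j < xs.length) → ¬ p xs[j]) :
    xs.countP p = k := by
  rw [← List.take_append_drop k xs, List.countP_append]
  have h1 : (xs.take k).countP p = (xs.take k).length := by
    rw [List.countP_eq_length]
    intro a ha
    obtain ⟨i, hi, rfl⟩ := List.mem_iff_getElem.mp ha
    simp only [List.length_take] at hi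
    have hil : i < xs.length := by omega
    rw [List.getElem_take]
    exact hlow i (by omega) hil
  have h2 : (xs.drop k).countP p = 0 := by
    rw [List.countP_eq_zero]
    intro a ha
    obtain ⟨i, hi, rfl⟩ := List.mem_iff_getElem.mp ha
    simp only [List.length_drop] at hi
    rw [List.getElem_drop]
    exact hhigh (k + i) (by omega) (by omega)
  rw [h1, h2, List.length_take]
  omega

-- binary-search correctness: on a sorted list split as "indices < lo are ≤ x,
-- indices ≥ hi are > x", the loop returns the number of elements ≤ x
theorem pvBisectLoop_eq_countP (xs : List Int) (x : Int)
    (hs : List.Pairwise (· ≤ ·) xs) :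
    ∀ lo hi : Nat, lo ≤ hi → hi ≤ xs.length →
      (∀ j : Nat, j < lo → (hj : j < xs.length) → xs[j] ≤ x) →
      (∀ j : Nat, hi ≤ j → (hj : j < xs.length) → x < xs[j]) →
      pvBisectLoop xs x lo hi = xs.countP (fun y => decide (y ≤ x)) := by
  have hmono : ∀ i j : Nat, (hij : i ≤ j) → (hj : j < xs.length) → xs[i]'(Nat.lt_of_le_of_lt hij hj) ≤ xs[j] := by
    intro i j hij hj
    rcases Nat.eq_or_lt_of_le hij with rfl | hlt
    · exact le_refl _
    · exact (List.pairwise_iff_getElem.mp hs) i j (by omega) hj hlt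
  intro lo hi
  induction lo, hi using pvBisectLoop.induct xs x with
  | case1 lo hi hlt y hy hxy ih =>
      intro _ hhi hlow hhigh
      have hmid : (lo + hi) / 2 < xs.length := by omega
      have hy' : xs[(lo + hi) / 2] = y := (List.getElem?_eq_some_iff.mp hy).choose_spec
      rw [pvBisectLoop]
      simp only [if_pos hlt, hy]
      rw [if_pos hxy]
      refine ih (by omega) (by omega) hlow ?_
      intro j hj hjl
      exact lt_of_lt_of_le (hy' ▸ hxy) (hmono _ _ hj hjl)
  | case2 lo hi hlt y hy hxy ih =>
      intro _ hhi hlow hhigh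
      have hmid : (lo + hi) / 2 < xs.length := by omega
      have hy' : xs[(lo + hi) / 2] = y := (List.getElem?_eq_some_iff.mp hy).choose_spec
      rw [pvBisectLoop]
      simp only [if_pos hlt, hy]
      rw [if_neg hxy]
      refine ih (by omega) hhi ?_ hhigh
      intro j hj hjl
      exact le_trans (hmono _ _ (by omega) hmid) (hy' ▸ (not_lt.mp hxy))
  | case3 lo hi hlt hnone =>
      intro _ hhi _ _
      have := List.getElem?_eq_none_iff.mp hnone
      omega
  | case4 lo hi hlt =>
      intro hle hhi hlow hhigh
      rw [pvBisectLoop, if_neg hlt]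
      refine (countP_eq_of_split xs _ lo (by omega) ?_ ?_).symm
      · intro j hj hjl; exact decide_eq_true (hlow j hj hjl)
      · intro j hj hjl
        simp only [decide_eq_true_eq, not_le]
        exact hhigh j (by omega) hjl

theorem pvBisectRight_eq_countP (xs : List Int) (x : Int)
    (hs : List.Pairwise (· ≤ ·) xs) :
    pvBisectRight xs x = xs.countP (fun y => decide (y ≤ x)) := by
  refine pvBisectLoop_eq_countP xs x hs 0 xs.length (by omega) (le_refl _) ?_ ?_
  · intro j hj _; omega
  · intro j hj hjl; omega

-- the three buckets partition the counts
theorem pv_count_split (l : List Int) :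
    l.countP (fun e => decide (e ≤ 10)) + l.countP (fun e => decide (10 < e ∧ e ≤ 28))
      = l.countP (fun e => decide (e ≤ 28))
    ∧ l.countP (fun e => decide (e ≤ 28)) + l.countP (fun e => decide (28 < e)) = l.length := by
  induction l with
  | nil => simp
  | cons a t ih =>
      simp only [List.countP_cons, List.length_cons, decide_eq_true_eq]
      rcases ih with ⟨ih1, ih2⟩
      constructor <;> (split_ifs with h1 h2 h3 <;> omega)

-- ===== VERDICT (by name: the statement is the Claim_ definition above) =====
theorem determine_chip_timing_preference_py_spec : Claim_equal_determine_chip_timing_preference_py := by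
  intro chips _ _
  unfold Spec_determine_chip_timing_preference_py determine_chip_timing_preference_py determine_chip_timing_preference_py_alt
  by_cases h : chips = []
  · simp [h]
  · simp only [if_neg h]
    set l := chips.map pvEvent with hl
    set s := PySem.List.sorted l (fun e => e) false with hsdef
    have hs : List.Pairwise (· ≤ ·) s := PySem.List.sorted_pairwise l (fun e => e)
    have hperm : s.Perm l := PySem.List.sorted_perm l (fun e => e) false
    have hlen : s.length = l.length := hperm.length_eq
    have hc10 : s.countP (fun y => decide (y ≤ 10)) = l.countP (fun y => decide (y ≤ 10)) :=
      hperm.countP_eq _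
    have hc28 : s.countP (fun y => decide (y ≤ 28)) = l.countP (fun y => decide (y ≤ 28)) :=
      hperm.countP_eq _
    have hb10 := (pvBisectRight_eq_countP s 10 hs).trans hc10
    have hb28 := (pvBisectRight_eq_countP s 28 hs).trans hc28
    obtain ⟨hsplit1, hsplit2⟩ := pv_count_split l
    -- A's three folds are the three bucket counts of l
    have hA1 : chips.foldl (fun a c => if pvEvent c ≤ 10 then a + 1 else a) (0 : Int)
        = (l.countP (fun y => decide (y ≤ 10)) : Int) := by
      rw [PySem.List.foldl_ite_add_one, hl, List.countP_map]
      simp [Function.comp_def]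
    have hA2 : chips.foldl (fun a c => if 10 < pvEvent c ∧ pvEvent c ≤ 28 then a + 1 else a) (0 : Int)
        = (l.countP (fun y => decide (10 < y ∧ y ≤ 28)) : Int) := by
      rw [PySem.List.foldl_ite_add_one, hl, List.countP_map]
      simp [Function.comp_def]
    have hA3 : chips.foldl (fun a c => if pvEvent c > 28 then a + 1 else a) (0 : Int)
        = (l.countP (fun y => decide (28 < y)) : Int) := by
      rw [PySem.List.foldl_ite_add_one, hl, List.countP_map]
      simp [Function.comp_def, gt_iff_lt]
    simp only [hA1, hA2, hA3, hb10, hb28, hlen]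
    have e1 : ((l.length : Int) - (l.countP (fun y => decide (y ≤ 28)) : Int))
        = (l.countP (fun y => decide (28 < y)) : Int) := by omega
    have e2 : ((l.length : Int) - (l.countP (fun y => decide (y ≤ 10)) : Int)
          - (l.countP (fun y => decide (28 < y)) : Int))
        = (l.countP (fun y => decide (10 < y ∧ y ≤ 28)) : Int) := by omega
    rw [e1, e2]
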